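-- pv_equiv track=rewrite | github.com/MichaelGurevich/NLP-Assignment1 | cloze_utils.py | find_blanks
-- ===== SOURCE A (Python) =====
-- def find_blanks(text):
--     blanks = []
--     in_Blank = False
--     start = None
--
--     for index, char in enumerate(text):
--         if char == '_':
--             if in_Blank == False:  #found start of new blank
--                 start = index
--                 in_Blank = True
--         else:
--             if in_Blank:  # found end of blank
--                 blanks.append((start, index-1))
--                 in_Blank = False
--
--
--     if in_Blank: #end of string is blank
--         blanks.append((start, len(text)-1))
--
--     return blanks
-- ===== SOURCE B (Python) =====
-- def find_blanks(text):
--     # index-based run scanner: consume each maximal underscore run in one step,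
--     # emitting its (start, end) pair directly; no in_Blank flag, no end-of-string fixup
--     res = []
--     i, n = 0, len(text)
--     while i < n:
--         if text[i] != '_':
--             i += 1
--             continue
--         j = i + 1
--         while j < n and text[j] == '_':
--             j += 1
--         res.append((i, j - 1))
--         i = j
--     return res
-- ===== Notes on version B (the rewrite author's own statement) =====
-- stated objective: alternative
-- what changed: Replaced the flag-based state machine with end-of-string fixup by a recursive scanner that consumes each maximal underscore run in one step and emits its (start, end) pair directly.
import Mathlib
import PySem

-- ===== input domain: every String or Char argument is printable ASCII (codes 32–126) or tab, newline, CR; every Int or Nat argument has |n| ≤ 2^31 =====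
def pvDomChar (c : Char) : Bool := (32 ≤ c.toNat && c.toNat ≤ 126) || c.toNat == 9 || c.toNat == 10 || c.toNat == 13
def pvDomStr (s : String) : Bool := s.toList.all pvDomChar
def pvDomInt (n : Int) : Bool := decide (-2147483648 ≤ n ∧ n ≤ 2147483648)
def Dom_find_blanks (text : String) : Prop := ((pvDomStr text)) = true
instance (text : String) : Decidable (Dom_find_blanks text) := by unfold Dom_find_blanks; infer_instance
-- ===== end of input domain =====

-- B replaces A's in_Blank flag state machine (with end-of-string fixup) by a run-consuming
-- index scanner that emits each maximal underscore run directly; same cost, alternative structure.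

-- ===== PORT A =====
-- A's loop body: state (blanks, in_Blank, start); Python's start=None is Option Int,
-- read with getD 0 only when in_Blank is true (then it is always some _).
def stepA (st : List (Int × Int) × Bool × Option Int) (ic : Int × Char) :
    List (Int × Int) × Bool × Option Int :=
  match st, ic with
  | (blanks, inB, start), (index, char) =>
    if char = '_' then
      if inB = false then (blanks, true, some index) else (blanks, inB, start)
    else
      if inB then (blanks ++ [(start.getD 0, index - 1)], false, start) else (blanks, inB, start)

def find_blanks (text : String) : List (Int × Int) :=
  match (PySem.List.enumerate text.toList 0).foldl stepA ([], false, none) with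
  | (blanks, inB, start) =>
    if inB then blanks ++ [(start.getD 0, (text.toList.length : Int) - 1)] else blanks

-- ===== PORT B =====
-- inner while loop: advance j over underscores
def scanRun (cs : List Char) (n j : Nat) : Nat :=
  if h : j < n ∧ cs.getD j ' ' = '_' then scanRun cs n (j + 1) else j
termination_by n - j
decreasing_by omega

-- cited by goB's termination proof
theorem scanRun_ge (cs : List Char) (n j : Nat) : j ≤ scanRun cs n j := by
  rw [scanRun]
  split
  · exact Nat.le_trans (Nat.le_succ j) (scanRun_ge cs n (j + 1))
  · exact Nat.le_refl j
termination_by n - j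
decreasing_by omega

-- outer while loop of Source B
def goB (cs : List Char) (n i : Nat) : List (Int × Int) :=
  if _h : i < n then
    if cs.getD i ' ' ≠ '_' then goB cs n (i + 1)
    else
      let j := scanRun cs n (i + 1)
      ((i : Int), (j : Int) - 1) :: goB cs n j
  else []
termination_by n - i
decreasing_by
  · omega
  · have := scanRun_ge cs n (i + 1); omega

def find_blanks_alt (text : String) : List (Int × Int) :=
  goB text.toList text.toList.length 0

-- ===== PRECONDITION & SPEC =====
def Spec_find_blanks (text : String) (out : List (Int × Int)) : Prop := out = find_blanks_alt text
instance (text : String) (out : List (Int × Int)) : Decidable (Spec_find_blanks text out) := by unfold Spec_find_blanks; infer_instance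

-- ===== CLAIM (what is proved, stated in full; the proofs are below) =====
def Claim_equal_find_blanks : Prop := ∀ (text : String), Dom_find_blanks text → Spec_find_blanks text (find_blanks text)

-- ===== LEMMAS AND PROOFS =====

-- A's fold over the suffix of cs starting at index i, followed by A's end-of-string fixup
def runA (cs : List Char) (acc : List (Int × Int)) (inB : Bool) (st : Option Int) (i : Nat) :
    List (Int × Int) :=
  match (PySem.List.enumerate (cs.drop i) (i : Int)).foldl stepA (acc, inB, st) with
  | (blanks, b, s) =>
    if b then blanks ++ [(s.getD 0, (cs.length : Int) - 1)] else blanks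

theorem runA_stop (cs : List Char) (acc : List (Int × Int)) (inB : Bool) (st : Option Int)
    (i : Nat) (h : cs.length ≤ i) :
    runA cs acc inB st i =
      if inB then acc ++ [(st.getD 0, (cs.length : Int) - 1)] else acc := by
  have hd : cs.drop i = [] := List.drop_eq_nil_of_le h
  simp [runA, hd]

theorem runA_cons (cs : List Char) (acc : List (Int × Int)) (inB : Bool) (st : Option Int)
    (i : Nat) (h : i < cs.length) :
    runA cs acc inB st i =
      runA cs (stepA (acc, inB, st) ((i : Int), cs[i])).1
        (stepA (acc, inB, st) ((i : Int), cs[i])).2.1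
        (stepA (acc, inB, st) ((i : Int), cs[i])).2.2 (i + 1) := by
  have hd : cs.drop i = cs[i] :: cs.drop (i + 1) := List.drop_eq_getElem_cons h
  simp only [runA, hd, PySem.List.enumerate_cons, List.foldl_cons]
  have hcast : ((i : Int) + 1) = ((i + 1 : Nat) : Int) := by push_cast; ring
  rw [hcast]

theorem stop_both (cs : List Char) (i : Nat) (hi : cs.length ≤ i)
    (acc : List (Int × Int)) (st : Option Int) :
    (runA cs acc false st i = acc ++ goB cs cs.length i) ∧
    (∀ s0 : Int, i ≤ cs.length →
      runA cs acc true (some s0) i =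
        acc ++ ((s0, (scanRun cs cs.length i : Int) - 1) ::
          goB cs cs.length (scanRun cs cs.length i))) := by
  constructor
  · rw [runA_stop cs acc false st i hi, goB]
    simp [Nat.not_lt_of_le hi]
  · intro s0 hle
    have hieq : i = cs.length := le_antisymm hle hi
    rw [runA_stop cs acc true (some s0) i hi]
    have hscan : scanRun cs cs.length i = i := by
      rw [scanRun]; simp [hieq]
    rw [hscan]
    conv_rhs => rw [goB]
    simp [hieq]

theorem joint (cs : List Char) :
    ∀ (k i : Nat), cs.length - i ≤ k → ∀ (acc : List (Int × Int)) (st : Option Int),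
      (runA cs acc false st i = acc ++ goB cs cs.length i) ∧
      (∀ s0 : Int, i ≤ cs.length →
        runA cs acc true (some s0) i =
          acc ++ ((s0, (scanRun cs cs.length i : Int) - 1) ::
            goB cs cs.length (scanRun cs cs.length i))) := by
  intro k
  induction k with
  | zero =>
    intro i hfuel acc st
    exact stop_both cs i (by omega) acc st
  | succ k ih =>
    intro i hfuel acc st
    by_cases hi : i < cs.length
    · have hfuel' : cs.length - (i + 1) ≤ k := by omega
      by_cases hc : cs[i] = '_'
      · constructor
        · -- in_Blank false, underscore: enter the blank at i
          rw [runA_cons cs acc false st i hi]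
          have hstep : stepA (acc, false, st) ((i : Int), cs[i]) = (acc, true, some (i : Int)) := by
            simp [stepA, hc]
          rw [hstep]
          have h2 := (ih (i + 1) hfuel' acc st).2 (i : Int) (by omega)
          rw [h2]
          conv_rhs => rw [goB]
          simp [hi, List.getD_eq_getElem?_getD, hc]
        · -- in_Blank true, underscore: stay in the blank
          intro s0 _
          rw [runA_cons cs acc true (some s0) i hi]
          have hstep : stepA (acc, true, some s0) ((i : Int), cs[i]) = (acc, true, some s0) := by
            simp [stepA, hc]
          rw [hstep]
          have h2 := (ih (i + 1) hfuel' acc (some s0)).2 s0 (by omega)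
          rw [h2]
          have hscan : scanRun cs cs.length i = scanRun cs cs.length (i + 1) := by
            rw [scanRun]; simp [hi, List.getD_eq_getElem?_getD, hc]
          rw [hscan]
      · constructor
        · -- in_Blank false, non-underscore: skip
          rw [runA_cons cs acc false st i hi]
          have hstep : stepA (acc, false, st) ((i : Int), cs[i]) = (acc, false, st) := by
            simp [stepA, hc]
          rw [hstep]
          have h1 := (ih (i + 1) hfuel' acc st).1
          rw [h1]
          conv_rhs => rw [goB]
          simp [hi, List.getD_eq_getElem?_getD, hc]
        · -- in_Blank true, non-underscore: close the blank at i-1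
          intro s0 _
          rw [runA_cons cs acc true (some s0) i hi]
          have hstep : stepA (acc, true, some s0) ((i : Int), cs[i]) =
              (acc ++ [(s0, (i : Int) - 1)], false, some s0) := by
            simp [stepA, hc]
          rw [hstep]
          have h1 := (ih (i + 1) hfuel' (acc ++ [(s0, (i : Int) - 1)]) (some s0)).1
          rw [h1]
          have hscan : scanRun cs cs.length i = i := by
            rw [scanRun]; simp [List.getD_eq_getElem?_getD, List.getElem?_eq_getElem hi, hc]
          rw [hscan]
          conv_rhs => rw [goB]
          simp [hi, List.getD_eq_getElem?_getD, hc]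
    · exact stop_both cs i (by omega) acc st

-- ===== VERDICT (by name: the statement is the Claim_ definition above) =====
theorem find_blanks_spec : Claim_equal_find_blanks := by
  intro text _
  unfold Spec_find_blanks find_blanks find_blanks_alt
  have h := (joint text.toList text.toList.length 0 (by omega) [] none).1
  unfold runA at h
  simpa using h
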